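-- pv_equiv track=rewrite | github.com/RitaAssaf/Scripts_Thesis | ilf_test_iterations.py | next_label
-- ===== SOURCE A (Python) =====
-- def next_label(label):
-- 	if not label:
-- 		return 'a'
--
-- 	label = list(label)
-- 	i = len(label) - 1
--
-- 	while i >= 0 and label[i] == 'z':
-- 		label[i] = 'a'
-- 		i -= 1
--
-- 	if i < 0:
-- 		label = ['a'] + label
-- 	else:
-- 		label[i] = chr(ord(label[i]) + 1)
--
-- 	return ''.join(label)
-- ===== SOURCE B (Python) =====
-- def next_label(label):
--     if not label:
--         return 'a'
--     if label[-1] == 'z':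
--         return next_label(label[:-1]) + 'a'
--     return label[:-1] + chr(ord(label[-1]) + 1)
-- ===== Notes on version B (the rewrite author's own statement) =====
-- stated objective: simpler
-- what changed: Replaces A's list conversion, explicit backward index loop and join by a short recursion on the string prefix that threads the carry: a trailing last letter of the alphabet recurses on the prefix and appends the first letter, so labels consisting only of that letter grow by one character just as in A.
import Mathlib
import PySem

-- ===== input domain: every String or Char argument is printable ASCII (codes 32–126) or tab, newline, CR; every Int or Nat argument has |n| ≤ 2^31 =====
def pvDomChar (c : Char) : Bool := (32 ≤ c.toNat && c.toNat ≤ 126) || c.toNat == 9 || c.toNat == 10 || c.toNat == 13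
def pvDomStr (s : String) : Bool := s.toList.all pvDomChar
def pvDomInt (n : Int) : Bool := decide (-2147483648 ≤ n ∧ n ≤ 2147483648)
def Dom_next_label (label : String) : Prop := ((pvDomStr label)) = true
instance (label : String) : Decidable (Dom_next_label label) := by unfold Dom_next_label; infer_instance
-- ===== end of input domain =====

-- B replaces A's backward index loop over a char list by a short recursion on the prefix
-- that threads the carry; same return value for every string (objective: simpler).

-- ===== PORT A =====
-- the while loop: `n` is i+1 (so n = 0 means i = -1); returns the list and the final i
def nl_while (lbl : List Char) (n : Nat) : List Char × Int :=
  match n with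
  | 0 => (lbl, -1)
  | m + 1 =>
    if lbl.getD m 'a' = 'z' then nl_while (lbl.set m 'a') m
    else (lbl, (m : Int))

def next_label (label : String) : String :=
  if label.toList = [] then "a"
  else
    let p := nl_while label.toList label.toList.length
    if p.2 < 0 then String.ofList ('a' :: p.1)
    else String.ofList (p.1.set p.2.toNat (Char.ofNat ((p.1.getD p.2.toNat 'a').toNat + 1)))

-- ===== PORT B =====
def nl_alt_go : List Char → List Char
  | [] => ['a']
  | c :: rest =>
    if (c :: rest).getLast! = 'z' then nl_alt_go (c :: rest).dropLast ++ ['a']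
    else (c :: rest).dropLast ++ [Char.ofNat ((c :: rest).getLast!.toNat + 1)]
termination_by cs => cs.length
decreasing_by simp

def next_label_alt (label : String) : String := String.ofList (nl_alt_go label.toList)

-- ===== PRECONDITION & SPEC =====
def Spec_next_label (label : String) (out : String) : Prop := out = next_label_alt label
instance (label : String) (out : String) : Decidable (Spec_next_label label out) := by unfold Spec_next_label; infer_instance

-- ===== CLAIM (what is proved, stated in full; the proofs are below) =====
def Claim_equal_next_label : Prop := ∀ (label : String), Dom_next_label label → Spec_next_label label (next_label label)

-- ===== LEMMAS AND PROOFS =====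

-- the whole core of A, as a function of the char list
def nl_coreA (cs : List Char) : List Char :=
  let p := nl_while cs cs.length
  if p.2 < 0 then 'a' :: p.1
  else p.1.set p.2.toNat (Char.ofNat ((p.1.getD p.2.toNat 'a').toNat + 1))

theorem nl_while_len (n : Nat) : ∀ cs : List Char, ((nl_while cs n).1).length = cs.length := by
  induction n with
  | zero => intro cs; simp [nl_while]
  | succ m ih => intro cs; simp only [nl_while]; split <;> simp [ih]

theorem nl_while_lt (n : Nat) : ∀ cs : List Char, (nl_while cs n).2 < (n : Int) := by
  induction n with
  | zero => intro cs; simp [nl_while]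
  | succ m ih =>
    intro cs; simp only [nl_while]; split
    · exact lt_trans (ih _) (by exact_mod_cast Nat.lt_succ_self m)
    · show (m : Int) < ((m + 1 : Nat) : Int)
      exact_mod_cast Nat.lt_succ_self m

theorem nl_while_append (n : Nat) : ∀ (ds t : List Char), n ≤ ds.length →
    nl_while (ds ++ t) n = ((nl_while ds n).1 ++ t, (nl_while ds n).2) := by
  induction n with
  | zero => intro ds t _; simp [nl_while]
  | succ m ih =>
    intro ds t h
    have hm : m < ds.length := h
    simp only [nl_while, List.getD, List.getElem?_append_left hm,
      List.set_append_left _ _ hm]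
    split
    · exact ih _ t (by simpa using Nat.le_of_lt hm)
    · rfl

theorem nl_coreA_concat (ds : List Char) (c : Char) :
    nl_coreA (ds ++ [c]) =
      if c = 'z' then nl_coreA ds ++ ['a'] else ds ++ [Char.ofNat (c.toNat + 1)] := by
  have hlen : (ds ++ [c]).length = ds.length + 1 := by simp
  unfold nl_coreA
  rw [hlen]
  simp only [nl_while]
  have hget : (ds ++ [c]).getD ds.length 'a' = c := by
    simp [List.getD]
  rw [hget]
  by_cases hc : c = 'z'
  · subst hc
    rw [if_pos rfl]
    have hset : (ds ++ ['z']).set ds.length 'a' = ds ++ ['a'] := by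
      rw [List.set_append_right _ _ (le_refl ds.length)]; simp
    rw [hset, nl_while_append ds.length ds ['a'] (le_refl _), if_pos rfl]
    set p := nl_while ds ds.length with hp
    by_cases hneg : p.2 < 0
    · simp [hneg]
    · have h0 : 0 ≤ p.2 := not_lt.1 hneg
      have hlt : p.2 < (ds.length : Int) := nl_while_lt _ _
      have htn : p.2.toNat < p.1.length := by
        rw [nl_while_len]; omega
      simp only [if_neg hneg]
      rw [List.getD, List.getElem?_append_left htn,
        List.set_append_left _ _ htn]
      simp [List.getD]
  · simp only [if_neg hc]
    have hneg : ¬ ((ds.length : Int) < 0) := not_lt.2 (Int.natCast_nonneg _)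
    simp only [if_neg hneg]
    have hIt : ((ds.length : Int)).toNat = ds.length := Int.toNat_natCast _
    rw [hIt, hget, List.set_append_right _ _ (le_refl ds.length)]
    simp

theorem nl_alt_go_nil : nl_alt_go [] = ['a'] := by simp [nl_alt_go]

theorem nl_alt_go_concat (ds : List Char) (c : Char) :
    nl_alt_go (ds ++ [c]) =
      if c = 'z' then nl_alt_go ds ++ ['a'] else ds ++ [Char.ofNat (c.toNat + 1)] := by
  obtain ⟨x, xs, hx⟩ : ∃ x xs, ds ++ [c] = x :: xs := by
    cases ds with
    | nil => exact ⟨c, [], rfl⟩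
    | cons a as => exact ⟨a, as ++ [c], rfl⟩
  rw [hx, nl_alt_go, ← hx]
  have hl : (ds ++ [c]).getLast! = c := by
    cases h2 : ds ++ [c] with
    | nil => simp at h2
    | cons x xs => simp [List.getLast!, ← h2]
  have hd : (ds ++ [c]).dropLast = ds := by simp
  rw [hl, hd]

theorem nl_core_eq_alt (cs : List Char) : nl_coreA cs = nl_alt_go cs := by
  induction cs using List.reverseRecOn with
  | nil => simp [nl_coreA, nl_while, nl_alt_go_nil]
  | append_singleton ds c ih =>
    rw [nl_coreA_concat, nl_alt_go_concat, ih]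

-- ===== VERDICT (by name: the statement is the Claim_ definition above) =====
theorem next_label_spec : Claim_equal_next_label := by
  intro label _
  unfold Spec_next_label next_label next_label_alt
  by_cases h : label.toList = []
  · rw [if_pos h, h, nl_alt_go_nil]
  · rw [if_neg h, ← nl_core_eq_alt]
    unfold nl_coreA
    exact (apply_ite String.ofList _ _ _).symm
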